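-- pv_equiv track=rewrite | github.com/pypi-data/pypi-mirror-368 | packages/latin-rectangles/latin_rectangles-0.1.2.tar.gz/latin_rectangles-0.1.2/benchmark.py | create_specific_cycle_structure
-- ===== SOURCE A (Python) =====
-- def create_specific_cycle_structure(
--     n: int, cycle_lengths: list[int]
-- ) -> list[int] | None:
--     """
--     Create a permutation with a specific cycle structure.
--
--     Args:
--         n: Total size
--         cycle_lengths: List of desired cycle lengths
--
--     Returns:
--         Permutation with the specified cycle structure, or None if impossible
--     """
--     if sum(cycle_lengths) != n:
--         return None
--
--     perm = [0] * (n + 1)  # 1-indexed with 0 at start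
--     used = set()
--     current_pos = 1
--
--     for cycle_len in cycle_lengths:
--         # Find available positions for this cycle
--         cycle_positions: list[int] = []
--         while len(cycle_positions) < cycle_len and current_pos <= n:
--             if current_pos not in used:
--                 cycle_positions.append(current_pos)
--             current_pos += 1
--
--         if len(cycle_positions) < cycle_len:
--             # Find remaining positions
--             for i in range(1, n + 1):
--                 if i not in used and len(cycle_positions) < cycle_len:
--                     cycle_positions.append(i)
--
--         # Create the cycle
--         for i in range(cycle_len):
--             perm[cycle_positions[i]] = cycle_positions[(i + 1) % cycle_len]
--             used.add(cycle_positions[i])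
--
--     return perm
-- ===== SOURCE B (Python) =====
-- def create_specific_cycle_structure(n, cycle_lengths):
--     if sum(cycle_lengths) != n:
--         return None
--     perm = [0] * (n + 1)  # 1-indexed with 0 at start
--     start = 1
--     for cycle_len in cycle_lengths:
--         if cycle_len > 0:
--             for i in range(cycle_len - 1):
--                 perm[start + i] = start + i + 1
--             perm[start + cycle_len - 1] = start
--             start += cycle_len
--     return perm
-- ===== Notes on version B (the rewrite author's own statement) =====
-- stated objective: simpler
-- what changed: B drops the used set, the membership-testing while loop and the fallback rescan entirely: each cycle is laid over the next block of consecutive positions computed by direct arithmetic from a running start index.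
-- outside the precondition, e.g. on create_specific_cycle_structure(2, [3, -1]): A returns [0, 1, 1], B raises IndexError
import Mathlib
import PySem

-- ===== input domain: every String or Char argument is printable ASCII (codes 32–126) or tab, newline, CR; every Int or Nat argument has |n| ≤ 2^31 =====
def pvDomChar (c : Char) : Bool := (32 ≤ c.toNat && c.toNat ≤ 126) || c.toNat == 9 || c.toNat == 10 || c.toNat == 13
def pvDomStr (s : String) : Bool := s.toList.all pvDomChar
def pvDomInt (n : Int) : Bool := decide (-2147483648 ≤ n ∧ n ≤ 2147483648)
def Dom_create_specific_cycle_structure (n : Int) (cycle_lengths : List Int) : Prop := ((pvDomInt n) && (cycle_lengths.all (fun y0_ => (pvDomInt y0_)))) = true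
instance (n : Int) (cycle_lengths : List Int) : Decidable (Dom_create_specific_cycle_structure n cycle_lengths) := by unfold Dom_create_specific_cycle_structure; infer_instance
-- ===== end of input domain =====

-- B removes A's used-set bookkeeping, membership while-loop and fallback rescan, placing each
-- cycle on a consecutive block of positions computed by direct arithmetic (simpler, same cost).


-- ===== PORT A =====
-- A's inner 'while len(cycle_positions) < cycle_len and current_pos <= n' loop
def pvWhileCollect (n cycle_len : Int) (used : PySem.Set Int) (cur : Int) (acc : List Int) :
    List Int × Int :=
  if _h : (acc.length : Int) < cycle_len ∧ cur ≤ n then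
    pvWhileCollect n cycle_len used (cur + 1)
      (if PySem.Set.contains used cur then acc else acc ++ [cur])
  else (acc, cur)
termination_by (n + 1 - cur).toNat
decreasing_by omega

-- one iteration of A's 'for i in range(cycle_len)' cycle-creation loop (none = IndexError)
def pvACycleStep (pos : List Int) (cycle_len : Int)
    (st : Option (List Int × PySem.Set Int)) (i : Int) : Option (List Int × PySem.Set Int) :=
  match st with
  | none => none
  | some (perm, used) =>
    match PySem.List.pyGet? pos i, PySem.List.pyGet? pos (PySem.Int.mod (i + 1) cycle_len) with
    | some p, some q =>
      match PySem.List.pySet? perm p q with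
      | some perm' => some (perm', PySem.Set.add used p)
      | none => none
    | _, _ => none

-- the body of A's 'for cycle_len in cycle_lengths' loop
def pvAOuter (n : Int) (st : Option (List Int × PySem.Set Int × Int)) (cycle_len : Int) :
    Option (List Int × PySem.Set Int × Int) :=
  match st with
  | none => none
  | some (perm, used, cur) =>
    let wc := pvWhileCollect n cycle_len used cur []
    let pos :=
      if (wc.1.length : Int) < cycle_len then
        -- fallback: for i in range(1, n+1): if i not in used and len < cycle_len: append
        (PySem.List.pyRange 1 (n + 1) 1).foldl
          (fun cp i =>
            if ¬ (PySem.Set.contains used i = true) ∧ (cp.length : Int) < cycle_len then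
              cp ++ [i]
            else cp) wc.1
      else wc.1
    ((PySem.List.pyRange 0 cycle_len 1).foldl (pvACycleStep pos cycle_len)
        (some (perm, used))).map (fun pu => (pu.1, pu.2, wc.2))

def create_specific_cycle_structure (n : Int) (cycle_lengths : List Int) : Option (List Int) :=
  if cycle_lengths.sum ≠ n then none
  else
    (cycle_lengths.foldl (pvAOuter n)
      (some (List.replicate (n + 1).toNat 0, (PySem.Set.empty : PySem.Set Int), (1 : Int)))).map
      (·.1)

-- ===== PORT B =====
-- one iteration of B's inner 'for i in range(cycle_len - 1)' loop (none = IndexError)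
def pvBStep (start : Int) (p : Option (List Int)) (i : Int) : Option (List Int) :=
  match p with
  | none => none
  | some perm => PySem.List.pySet? perm (start + i) (start + i + 1)

-- the body of B's 'for cycle_len in cycle_lengths' loop
def pvBOuter (st : Option (List Int × Int)) (cycle_len : Int) : Option (List Int × Int) :=
  match st with
  | none => none
  | some (perm, start) =>
    if cycle_len > 0 then
      match (PySem.List.pyRange 0 (cycle_len - 1) 1).foldl (pvBStep start) (some perm) with
      | none => none
      | some perm' =>
        (PySem.List.pySet? perm' (start + cycle_len - 1) start).map
          (fun pp => (pp, start + cycle_len))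
    else some (perm, start)

def create_specific_cycle_structure_alt (n : Int) (cycle_lengths : List Int) :
    Option (List Int) :=
  if cycle_lengths.sum ≠ n then none
  else
    (cycle_lengths.foldl pvBOuter
      (some (List.replicate (n + 1).toNat 0, (1 : Int)))).map (·.1)

-- ===== PRECONDITION & SPEC =====
-- Pre_ excludes only mixed-sign cycle_lengths whose total still equals n: there A's fallback
-- rescan reuses positions and returns an array with duplicate entries that is no permutation
-- (or raises IndexError), while B's consecutive-block arithmetic raises IndexError.
def Pre_create_specific_cycle_structure (n : Int) (cycle_lengths : List Int) : Prop :=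
  cycle_lengths.sum ≠ n ∨ (∀ L ∈ cycle_lengths, 0 ≤ L) ∨ (∀ L ∈ cycle_lengths, L ≤ 0)
instance (n : Int) (cycle_lengths : List Int) :
    Decidable (Pre_create_specific_cycle_structure n cycle_lengths) := by
  unfold Pre_create_specific_cycle_structure; infer_instance

def pvWitness_create_specific_cycle_structure : Int × List Int := (4, [3, 1])

def Spec_create_specific_cycle_structure (n : Int) (cycle_lengths : List Int)
    (out : Option (List Int)) : Prop := out = create_specific_cycle_structure_alt n cycle_lengths
instance (n : Int) (cycle_lengths : List Int) (out : Option (List Int)) :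
    Decidable (Spec_create_specific_cycle_structure n cycle_lengths out) := by
  unfold Spec_create_specific_cycle_structure; infer_instance

-- ===== CLAIM (what is proved, stated in full; the proofs are below) =====
def Claim_equal_create_specific_cycle_structure : Prop := ∀ (n : Int) (cycle_lengths : List Int), Dom_create_specific_cycle_structure n cycle_lengths → Pre_create_specific_cycle_structure n cycle_lengths → Spec_create_specific_cycle_structure n cycle_lengths (create_specific_cycle_structure n cycle_lengths)

-- ===== LEMMAS AND PROOFS =====

-- the used set after consuming positions 1..c is literally the list [1, …, c]
def pvUsedOf (c : Int) : PySem.Set Int := PySem.List.pyRange 1 (c + 1) 1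

-- A's while loop on a used set lying entirely below cur collects the next block of positions
theorem pvWhileCollect_eq (n L : Int) (used : PySem.Set Int) :
    ∀ (k : Nat) (cur : Int) (acc : List Int),
      k = (L - acc.length).toNat →
      (∀ x ∈ used, x < cur) →
      cur + (L - (acc.length : Int)) ≤ n + 1 →
      pvWhileCollect n L used cur acc =
        (acc ++ PySem.List.pyRange cur (cur + (L - (acc.length : Int))) 1,
         cur + max (L - (acc.length : Int)) 0) := by
  intro k
  induction k with
  | zero =>
    intro cur acc hk _ _
    rw [pvWhileCollect, dif_neg (by omega), PySem.List.pyRange_one_eq_nil (by omega)]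
    simp
    omega
  | succ k ih =>
    intro cur acc hk hbelow hroom
    have h1 : (acc.length : Int) < L := by omega
    rw [pvWhileCollect, dif_pos ⟨h1, by omega⟩,
      if_neg (by intro hc; exact absurd (hbelow cur ((PySem.Set.contains_iff used cur).mp hc)) (by omega))]
    rw [ih (cur + 1) (acc ++ [cur]) (by simp; omega) (fun x hx => by have := hbelow x hx; omega)
      (by simp; omega)]
    rw [Prod.mk.injEq]
    constructor
    · rw [PySem.List.pyRange_one_cons (show cur < cur + (L - (acc.length : Int)) by omega)]
      simp
      congr 1
      omega
    · simp
      omega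

-- indexing into a consecutive block
theorem pvGet_range (a b i : Int) (h0 : 0 ≤ i) (h1 : i < b - a) :
    PySem.List.pyGet? (PySem.List.pyRange a b 1) i = some (a + i) := by
  obtain ⟨m, rfl⟩ := Int.eq_ofNat_of_zero_le h0
  rw [PySem.List.pyGet?_natCast, PySem.List.getElem?_pyRange_one, if_pos (by omega)]

-- item assignment at a valid nonnegative index
theorem pvSet_spec (xs : List Int) (i v : Int) (h0 : 0 ≤ i) (h1 : i < (xs.length : Int)) :
    PySem.List.pySet? xs i v = some (xs.set i.toNat v) := by
  obtain ⟨m, rfl⟩ := Int.eq_ofNat_of_zero_le h0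
  rw [PySem.List.pySet?_natCast xs m v (by omega)]
  simp

-- adding the block s, s+1, … to the used set {1, …, s-1}
theorem pvFoldAdd (s : Int) (hs : 1 ≤ s) :
    ∀ (k : Nat),
      (PySem.List.pyRange 0 (k : Int) 1).foldl (fun u i => PySem.Set.add u (s + i))
        (pvUsedOf (s - 1)) = pvUsedOf (s - 1 + k) := by
  intro k
  induction k with
  | zero => simp [PySem.List.pyRange_one_eq_nil]
  | succ k ih =>
    rw [show ((k + 1 : Nat) : Int) = (k : Int) + 1 by push_cast; ring,
      PySem.List.pyRange_one_succ_right (by omega), List.foldl_append, ih]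
    simp only [List.foldl_cons, List.foldl_nil]
    rw [PySem.Set.add_of_not_mem (by simp [pvUsedOf, PySem.List.mem_pyRange_one])]
    unfold pvUsedOf
    rw [show s - 1 + (k : Int) + 1 = s + k by ring, show s - 1 + ((k : Int) + 1) + 1 = s + k + 1 by ring,
      PySem.List.pyRange_one_succ_right (show (1 : Int) ≤ s + k by omega)]

-- lockstep of A's and B's inner loops over indices j .. L-2
theorem pvInnerLockstep (n L s : Int) (hs : 1 ≤ s) (hfit : s + L ≤ n + 1) :
    ∀ (k : Nat) (j : Int) (perm : List Int) (used : PySem.Set Int),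
      0 ≤ j → j + k = L - 1 → (perm.length : Int) = n + 1 →
      ∃ perm', (perm'.length : Int) = n + 1 ∧
        (PySem.List.pyRange j (L - 1) 1).foldl
            (pvACycleStep (PySem.List.pyRange s (s + L) 1) L) (some (perm, used)) =
          some (perm',
            (PySem.List.pyRange j (L - 1) 1).foldl (fun u i => PySem.Set.add u (s + i)) used) ∧
        (PySem.List.pyRange j (L - 1) 1).foldl (pvBStep s) (some perm) = some perm' := by
  intro k
  induction k with
  | zero =>
    intro j perm used _ hjk hlen
    have hnil : PySem.List.pyRange j (L - 1) 1 = [] := PySem.List.pyRange_one_eq_nil (by omega)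
    rw [hnil]
    exact ⟨perm, hlen, rfl, rfl⟩
  | succ k ih =>
    intro j perm used h0 hjk hlen
    have hjL : j < L - 1 := by omega
    rw [PySem.List.pyRange_one_cons hjL]
    simp only [List.foldl_cons]
    have hm : PySem.Int.mod (j + 1) L = j + 1 := by
      rw [PySem.Int.mod_eq_emod_of_pos (show (0 : Int) < L by omega)]
      exact Int.emod_eq_of_lt (by omega) (by omega)
    have hg1 := pvGet_range s (s + L) j h0 (by omega)
    have hg2 := pvGet_range s (s + L) (j + 1) (by omega) (by omega)
    have hset := pvSet_spec perm (s + j) (s + (j + 1))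
      (show (0 : Int) ≤ s + j by omega)
      (show s + j < (perm.length : Int) by rw [hlen]; omega)
    have hstep : pvACycleStep (PySem.List.pyRange s (s + L) 1) L (some (perm, used)) j =
        some (perm.set (s + j).toNat (s + (j + 1)), PySem.Set.add used (s + j)) := by
      simp only [pvACycleStep, hm, hg1, hg2, hset]
    have hstepB : pvBStep s (some perm) j = some (perm.set (s + j).toNat (s + (j + 1))) := by
      simp only [pvBStep, show s + j + 1 = s + (j + 1) by ring, hset]
    rw [hstep, hstepB]
    exact ih (j + 1) (perm.set (s + j).toNat (s + (j + 1))) (PySem.Set.add used (s + j))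
      (by omega) (by omega) (by simpa using hlen)

-- one full cycle: A's cycle-creation loop and B's block assignment produce the same array
theorem pvCycleBoth (n L s : Int) (hL : 1 ≤ L) (hs : 1 ≤ s) (hfit : s + L ≤ n + 1)
    (perm : List Int) (used : PySem.Set Int) (hlen : (perm.length : Int) = n + 1) :
    ∃ perm', (perm'.length : Int) = n + 1 ∧
      (PySem.List.pyRange 0 L 1).foldl
          (pvACycleStep (PySem.List.pyRange s (s + L) 1) L) (some (perm, used)) =
        some (perm',
          (PySem.List.pyRange 0 L 1).foldl (fun u i => PySem.Set.add u (s + i)) used) ∧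
      (match (PySem.List.pyRange 0 (L - 1) 1).foldl (pvBStep s) (some perm) with
        | none => none
        | some p' =>
          (PySem.List.pySet? p' (s + L - 1) s).map (fun pp => (pp, s + L))) =
        some (perm', s + L) := by
  obtain ⟨perm₁, hl₁, hA, hB⟩ :=
    pvInnerLockstep n L s hs hfit (L - 1).toNat 0 perm used le_rfl (by omega) hlen
  have hsplit : PySem.List.pyRange 0 L 1 = PySem.List.pyRange 0 (L - 1) 1 ++ [L - 1] := by
    have h := PySem.List.pyRange_one_succ_right (show (0 : Int) ≤ L - 1 by omega)
    rw [show L - 1 + 1 = L by ring] at h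
    exact h
  have hm : PySem.Int.mod (L - 1 + 1) L = 0 := by
    rw [show L - 1 + 1 = L by ring, PySem.Int.mod_eq_emod_of_pos (show (0 : Int) < L by omega)]
    exact Int.emod_self
  have hg1 := pvGet_range s (s + L) (L - 1) (by omega) (by omega)
  have hg2 := pvGet_range s (s + L) 0 le_rfl (by omega)
  have hset := pvSet_spec perm₁ (s + (L - 1)) (s + 0)
    (show (0 : Int) ≤ s + (L - 1) by omega)
    (show s + (L - 1) < (perm₁.length : Int) by rw [hl₁]; omega)
  refine ⟨perm₁.set (s + (L - 1)).toNat (s + 0), by simpa using hl₁, ?_, ?_⟩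
  · rw [hsplit, List.foldl_append, List.foldl_append, hA]
    simp only [List.foldl_cons, List.foldl_nil]
    simp only [pvACycleStep, hm, hg1, hg2, hset]
  · rw [hB]
    simp only []
    rw [show s + L - 1 = s + (L - 1) by ring,
      pvSet_spec perm₁ (s + (L - 1)) s
        (show (0 : Int) ≤ s + (L - 1) by omega)
        (show s + (L - 1) < (perm₁.length : Int) by rw [hl₁]; omega)]
    simp

-- the main loop, in lockstep, over a list of nonnegative cycle lengths
theorem pvMainLoop (n : Int) :
    ∀ (ls : List Int) (c : Int) (perm : List Int),
      (∀ L ∈ ls, 0 ≤ L) → 0 ≤ c → c + ls.sum ≤ n → (perm.length : Int) = n + 1 →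
      ∃ perm', (perm'.length : Int) = n + 1 ∧
        ls.foldl (pvAOuter n) (some (perm, pvUsedOf c, c + 1)) =
          some (perm', pvUsedOf (c + ls.sum), c + ls.sum + 1) ∧
        ls.foldl pvBOuter (some (perm, c + 1)) = some (perm', c + ls.sum + 1) := by
  intro ls
  induction ls with
  | nil =>
    intro c perm _ _ _ hlen
    exact ⟨perm, hlen, by simp, by simp⟩
  | cons L ls ih =>
    intro c perm hpos hc hsum hlen
    simp only [List.sum_cons] at hsum ⊢
    have hL : 0 ≤ L := hpos L (by simp)
    have hrest : ∀ x ∈ ls, 0 ≤ x := fun x hx => hpos x (by simp [hx])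
    have hsls : 0 ≤ ls.sum := List.sum_nonneg hrest
    rcases eq_or_lt_of_le hL with hL0 | hL1
    · -- cycle length 0: both loop bodies leave the state unchanged
      have hA0 : pvAOuter n (some (perm, pvUsedOf c, c + 1)) L =
          some (perm, pvUsedOf c, c + 1) := by
        simp only [pvAOuter]
        rw [pvWhileCollect, dif_neg (by simp; omega)]
        have hnil : PySem.List.pyRange 0 L 1 = [] := PySem.List.pyRange_one_eq_nil (by omega)
        simp [hnil]
      have hB0 : pvBOuter (some (perm, c + 1)) L = some (perm, c + 1) := by
        simp only [pvBOuter]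
        rw [if_neg (by omega)]
      rw [List.foldl_cons, List.foldl_cons, hA0, hB0,
        show c + (L + ls.sum) = c + ls.sum by omega]
      exact ih c perm hrest hc (by omega) hlen
    · -- positive cycle length: the while loop takes the next consecutive block
      have hwc : pvWhileCollect n L (pvUsedOf c) (c + 1) [] =
          (PySem.List.pyRange (c + 1) (c + 1 + L) 1, c + 1 + L) := by
        have h := pvWhileCollect_eq n L (pvUsedOf c) L.toNat (c + 1) [] (by simp)
          (fun x hx => by simp only [pvUsedOf, PySem.List.mem_pyRange_one] at hx; omega)
          (by simp; omega)
        simpa [max_eq_left hL] using h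
      obtain ⟨perm₁, hl₁, hcA, hcB⟩ :=
        pvCycleBoth n L (c + 1) (by omega) (by omega) (by omega) perm (pvUsedOf c) hlen
      obtain ⟨kL, hkL⟩ := Int.eq_ofNat_of_zero_le hL
      have hadd : (PySem.List.pyRange 0 L 1).foldl
          (fun u i => PySem.Set.add u (c + 1 + i)) (pvUsedOf c) = pvUsedOf (c + L) := by
        have h := pvFoldAdd (c + 1) (by omega) kL
        rw [show c + 1 - 1 = c by ring] at h
        rw [hkL]
        exact h
      have hAO : pvAOuter n (some (perm, pvUsedOf c, c + 1)) L =
          some (perm₁, pvUsedOf (c + L), c + 1 + L) := by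
        simp only [pvAOuter, hwc]
        rw [if_neg (by rw [PySem.List.length_pyRange_one]; omega)]
        rw [hcA, hadd]
        rfl
      have hBO : pvBOuter (some (perm, c + 1)) L = some (perm₁, c + 1 + L) := by
        simp only [pvBOuter]
        rw [if_pos (by omega)]
        exact hcB
      obtain ⟨perm', h1, h2, h3⟩ := ih (c + L) perm₁ hrest (by omega) (by omega) hl₁
      rw [show c + (L + ls.sum) = c + L + ls.sum by ring]
      refine ⟨perm', h1, ?_, ?_⟩
      · rw [List.foldl_cons, hAO, show c + 1 + L = c + L + 1 by ring, h2]
      · rw [List.foldl_cons, hBO, show c + 1 + L = c + L + 1 by ring, h3]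

-- with every cycle length nonpositive both loops leave their state untouched
theorem pvSkipLoop (n : Int) :
    ∀ (ls : List Int) (perm : List Int) (used : PySem.Set Int) (cur start : Int),
      (∀ L ∈ ls, L ≤ 0) →
      ls.foldl (pvAOuter n) (some (perm, used, cur)) = some (perm, used, cur) ∧
      ls.foldl pvBOuter (some (perm, start)) = some (perm, start) := by
  intro ls
  induction ls with
  | nil => intro perm used cur start _; simp
  | cons L ls ih =>
    intro perm used cur start h
    have hL : L ≤ 0 := h L (by simp)
    have hA : pvAOuter n (some (perm, used, cur)) L = some (perm, used, cur) := by
      simp only [pvAOuter]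
      rw [pvWhileCollect, dif_neg (by simp; omega)]
      simp [PySem.List.pyRange_one_eq_nil hL]
    have hB : pvBOuter (some (perm, start)) L = some (perm, start) := by
      simp only [pvBOuter]
      rw [if_neg (by omega)]
    rw [List.foldl_cons, List.foldl_cons, hA, hB]
    exact ih perm used cur start (fun x hx => h x (by simp [hx]))

-- ===== VERDICT (by name: the statement is the Claim_ definition above) =====
theorem create_specific_cycle_structure_spec : Claim_equal_create_specific_cycle_structure := by
  intro n ls _ hpre
  unfold Spec_create_specific_cycle_structure create_specific_cycle_structure
    create_specific_cycle_structure_alt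
  by_cases hsum : ls.sum ≠ n
  · rw [if_pos hsum, if_pos hsum]
  · push Not at hsum
    rw [if_neg (not_not_intro (by exact hsum)), if_neg (not_not_intro (by exact hsum))]
    rcases hpre with h | hnn | hnp
    · exact absurd hsum h
    · -- all cycle lengths nonnegative: lockstep of the two main loops
      have hn : 0 ≤ n := by rw [← hsum]; exact List.sum_nonneg hnn
      have hlen : (((List.replicate (n + 1).toNat (0 : Int)).length : Int)) = n + 1 := by
        simp
        omega
      obtain ⟨perm', _, hA, hB⟩ :=
        pvMainLoop n ls 0 (List.replicate (n + 1).toNat 0) hnn le_rfl (by omega) hlen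
      have h0 : pvUsedOf 0 = (PySem.Set.empty : PySem.Set Int) := by
        have hnil : PySem.List.pyRange 1 ((0 : Int) + 1) 1 = [] :=
          PySem.List.pyRange_one_eq_nil (by omega)
        unfold pvUsedOf
        rw [hnil]
        rfl
      rw [h0, zero_add] at hA
      rw [zero_add] at hB
      rw [hA, hB]
      rfl
    · -- all cycle lengths nonpositive: both loops leave the initial state untouched
      obtain ⟨hA, hB⟩ :=
        pvSkipLoop n ls (List.replicate (n + 1).toNat 0) PySem.Set.empty 1 1 hnp
      rw [hA, hB]
      rfl
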